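-- pv_equiv track=rewrite | github.com/jl6078/voting_blockchain | dvr.py | get_distance_vector
-- ===== SOURCE A (Python) =====
-- def get_distance_vector(dv_table):
--     """
--     Get distance vector from the dv_table.
--     """
--     dest_to_neighbors = {}
--     for neighbor_id, dest_tuples_list in dv_table.items():
--         for dest_id, cost in dest_tuples_list:
--             dest_to_neighbors.setdefault(dest_id, []).append((neighbor_id, cost))
--
--     distance_vector = {
--         dest: min(neighbor_pairs, key=lambda x: x[1])[1]
--         for dest, neighbor_pairs in dest_to_neighbors.items()
--     }
--
--     return distance_vector
-- ===== SOURCE B (Python) =====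
-- def get_distance_vector(dv_table):
--     """
--     Get distance vector from the dv_table.
--     """
--     distance_vector = {}
--     for _neighbor_id, dest_tuples_list in dv_table.items():
--         for dest_id, cost in dest_tuples_list:
--             cur = distance_vector.get(dest_id)
--             if cur is None or cost < cur:
--                 distance_vector[dest_id] = cost
--     return distance_vector
-- ===== Notes on version B (the rewrite author's own statement) =====
-- stated objective: simpler
-- what changed: B drops the intermediate dest->list-of-(neighbor,cost) grouping dict and the second min-reduction pass; it streams once over all (dest, cost) pairs keeping a running minimum per destination.
import Mathlib
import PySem

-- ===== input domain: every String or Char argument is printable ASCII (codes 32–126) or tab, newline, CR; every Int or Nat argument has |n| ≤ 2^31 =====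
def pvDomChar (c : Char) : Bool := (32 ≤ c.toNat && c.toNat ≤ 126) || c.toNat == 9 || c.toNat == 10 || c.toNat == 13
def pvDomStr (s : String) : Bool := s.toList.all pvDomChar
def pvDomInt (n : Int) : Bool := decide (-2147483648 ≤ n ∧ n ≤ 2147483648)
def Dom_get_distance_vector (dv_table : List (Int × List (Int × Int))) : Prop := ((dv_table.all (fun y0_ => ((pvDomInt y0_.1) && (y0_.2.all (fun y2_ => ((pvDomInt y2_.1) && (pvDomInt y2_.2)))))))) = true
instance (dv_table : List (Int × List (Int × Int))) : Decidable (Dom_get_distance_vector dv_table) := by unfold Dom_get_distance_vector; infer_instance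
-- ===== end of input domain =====

-- B replaces A's two-phase grouping (dest -> list of (neighbor, cost), then a min pass)
-- by a single streaming pass keeping a running minimum per destination (objective: simpler).

-- ===== PORT A =====
-- A-side helper: min(neighbor_pairs, key=lambda x: x[1])[1]; the lists A applies it to are nonempty.
def pvMinCost (l : List (Int × Int)) : Int :=
  ((PySem.List.min? l (fun x => x.2)).getD (0, 0)).2

def get_distance_vector (dv_table : List (Int × List (Int × Int))) : List (Int × Int) :=
  let dest_to_neighbors : PySem.Dict Int (List (Int × Int)) :=
    dv_table.foldl (fun d p =>
      p.2.foldl (fun d q => d.modify q.1 [] (fun l => l ++ [(p.1, q.2)])) d)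
      PySem.Dict.empty
  let distance_vector : PySem.Dict Int Int :=
    dest_to_neighbors.items.foldl (fun d p => d.insert p.1 (pvMinCost p.2)) PySem.Dict.empty
  distance_vector.items

-- ===== PORT B =====
def get_distance_vector_alt (dv_table : List (Int × List (Int × Int))) : List (Int × Int) :=
  (dv_table.foldl (fun dv p =>
     p.2.foldl (fun dv q =>
       match dv.get? q.1 with
       | none => dv.insert q.1 q.2
       | some cur => if q.2 < cur then dv.insert q.1 q.2 else dv) dv)
   PySem.Dict.empty).items

-- ===== PRECONDITION & SPEC =====
def Spec_get_distance_vector (dv_table : List (Int × List (Int × Int))) (out : List (Int × Int)) : Prop := out = get_distance_vector_alt dv_table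
instance (dv_table : List (Int × List (Int × Int))) (out : List (Int × Int)) : Decidable (Spec_get_distance_vector dv_table out) := by unfold Spec_get_distance_vector; infer_instance

-- ===== CLAIM (what is proved, stated in full; the proofs are below) =====
def Claim_equal_get_distance_vector : Prop := ∀ (dv_table : List (Int × List (Int × Int))), Dom_get_distance_vector dv_table → Spec_get_distance_vector dv_table (get_distance_vector dv_table)

-- ===== LEMMAS AND PROOFS =====

-- The coupling invariant between A's grouping dict and B's running-minimum dict.
def pvInv (da : PySem.Dict Int (List (Int × Int))) (db : PySem.Dict Int Int) : Prop :=
  da.keys.Nodup ∧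
  db.items = da.items.map (fun p => (p.1, pvMinCost p.2)) ∧
  ∀ p ∈ da.items, p.2 ≠ []

theorem pvMinCost_singleton (n c : Int) : pvMinCost [(n, c)] = c := rfl

theorem pvMinCost_append (l : List (Int × Int)) (hl : l ≠ []) (n c : Int) :
    pvMinCost (l ++ [(n, c)]) = if c < pvMinCost l then c else pvMinCost l := by
  obtain ⟨m, hm⟩ : ∃ m, PySem.List.min? l (fun x => x.2) = some m := by
    cases h : PySem.List.min? l (fun x => x.2) with
    | none => exact absurd ((PySem.List.min?_eq_none_iff l (fun x => x.2)).mp h) hl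
    | some m => exact ⟨m, rfl⟩
  unfold pvMinCost
  unfold PySem.List.min? at *
  rw [List.foldl_append, hm]
  simp only [List.foldl_cons, List.foldl_nil, Option.getD_some]
  split_ifs <;> simp

theorem pvInv_keys {da db} (h : pvInv da db) : db.keys = da.keys := by
  obtain ⟨_, hit, _⟩ := h
  simp only [PySem.Dict.keys, hit, List.map_map]
  rfl

theorem pvInv_step (da : PySem.Dict Int (List (Int × Int))) (db : PySem.Dict Int Int)
    (n : Int) (q : Int × Int) (h : pvInv da db) :
    pvInv (da.modify q.1 [] (fun l => l ++ [(n, q.2)]))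
      (match db.get? q.1 with
       | none => db.insert q.1 q.2
       | some cur => if q.2 < cur then db.insert q.1 q.2 else db) := by
  obtain ⟨hnd, hit, hne⟩ := h
  have hkeys : db.keys = da.keys := pvInv_keys ⟨hnd, hit, hne⟩
  have hndb : db.keys.Nodup := hkeys ▸ hnd
  by_cases hc : da.contains q.1 = true
  · -- q.1 already grouped: A appends to its list, B compares with the running min
    obtain ⟨v, hv⟩ : ∃ v, da.get? q.1 = some v := by
      cases hg : da.get? q.1 with
      | none =>
        rw [PySem.Dict.get?_eq_none_iff_contains] at hg
        exact absurd hc (by simp [hg])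
      | some v => exact ⟨v, rfl⟩
    have hvmem : (q.1, v) ∈ da.items := PySem.Dict.mem_items_of_get?_eq_some da hv
    have hvne : v ≠ [] := hne _ hvmem
    have hgb : db.get? q.1 = some (pvMinCost v) :=
      PySem.Dict.get?_of_mem_items db (by rw [hit]; exact List.mem_map_of_mem hvmem) hndb
    have hcb : db.contains q.1 = true := by
      rw [PySem.Dict.contains_eq_decide_mem_keys, hkeys, ← PySem.Dict.contains_eq_decide_mem_keys]
      exact hc
    have hmod : da.modify q.1 [] (fun l => l ++ [(n, q.2)]) = da.insert q.1 (v ++ [(n, q.2)]) := by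
      unfold PySem.Dict.modify
      rw [PySem.Dict.getD_eq_get?_getD, hv]
      rfl
    -- every item of da with key q.1 carries value v (keys are nodup)
    have hval : ∀ p ∈ da.items, p.1 = q.1 → p.2 = v := by
      intro p hp hpk
      have := PySem.Dict.get?_of_mem_items da (show (p.1, p.2) ∈ da.items by simpa using hp) hnd
      rw [hpk, hv] at this
      exact (Option.some_injective _ this).symm
    have hA : (da.insert q.1 (v ++ [(n, q.2)])).items
        = da.items.map (fun p => if p.1 == q.1 then (q.1, v ++ [(n, q.2)]) else p) := by
      rw [PySem.Dict.items_insert]; simp [hc]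
    rw [hmod, hgb]
    refine ⟨?_, ?_, ?_⟩
    · rw [PySem.Dict.keys_insert_of_contains da _ hc]; exact hnd
    · rw [hA, List.map_map]
      by_cases hlt : q.2 < pvMinCost v
      · simp only [if_pos hlt]
        rw [PySem.Dict.items_insert]
        simp only [hcb, if_pos, hit, List.map_map]
        apply List.map_congr_left
        intro p hp
        simp only [Function.comp]
        by_cases hpk : p.1 = q.1
        · simp [hpk, pvMinCost_append v hvne n q.2, hlt]
        · simp [hpk]
      · simp only [if_neg hlt, hit]
        apply (List.map_congr_left _).symm
        intro p hp
        simp only [Function.comp]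
        by_cases hpk : p.1 = q.1
        · have hv2 := hval p hp hpk
          simp [hpk, hv2, pvMinCost_append v hvne n q.2, hlt]
        · simp [hpk]
    · intro p hp
      rw [hA] at hp
      obtain ⟨r, hr, hrp⟩ := List.mem_map.mp hp
      subst hrp
      split
      · simp
      · exact hne r hr
  · -- fresh destination: both append a new entry
    have hca : da.contains q.1 = false := by simpa using hc
    have hcb : db.contains q.1 = false := by
      rw [PySem.Dict.contains_eq_decide_mem_keys, hkeys, ← PySem.Dict.contains_eq_decide_mem_keys]
      exact hca
    have hgb : db.get? q.1 = none := (PySem.Dict.get?_eq_none_iff_contains db q.1).mpr hcb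
    have hmod : da.modify q.1 [] (fun l => l ++ [(n, q.2)]) = da.insert q.1 [(n, q.2)] := by
      unfold PySem.Dict.modify
      rw [PySem.Dict.getD_of_not_contains da [] hca]
      rfl
    rw [hmod, hgb]
    refine ⟨?_, ?_, ?_⟩
    · rw [PySem.Dict.keys_insert_of_not_contains da _ hca]
      rw [List.nodup_append]
      refine ⟨hnd, List.nodup_singleton _, ?_⟩
      intro x hx y hy
      obtain rfl : y = q.1 := List.mem_singleton.mp hy
      intro hxy
      subst hxy
      rw [← PySem.Dict.contains_iff_mem_keys] at hx
      exact Bool.false_ne_true (hca.symm.trans hx)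
    · rw [PySem.Dict.items_insert_of_not_contains db _ hcb,
        PySem.Dict.items_insert_of_not_contains da _ hca, hit, List.map_append]
      simp [pvMinCost_singleton]
    · intro p hp
      rw [PySem.Dict.items_insert_of_not_contains da _ hca] at hp
      rcases List.mem_append.mp hp with hp | hp
      · exact hne p hp
      · simp only [List.mem_singleton] at hp
        simp [hp]

theorem pvInv_inner (n : Int) (l : List (Int × Int))
    (da : PySem.Dict Int (List (Int × Int))) (db : PySem.Dict Int Int) (h : pvInv da db) :
    pvInv (l.foldl (fun d q => d.modify q.1 [] (fun v => v ++ [(n, q.2)])) da)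
      (l.foldl (fun dv q =>
        match dv.get? q.1 with
        | none => dv.insert q.1 q.2
        | some cur => if q.2 < cur then dv.insert q.1 q.2 else dv) db) := by
  induction l generalizing da db with
  | nil => exact h
  | cons q t ih =>
    simp only [List.foldl_cons]
    exact ih _ _ (pvInv_step da db n q h)

theorem pvInv_outer (dv_table : List (Int × List (Int × Int)))
    (da : PySem.Dict Int (List (Int × Int))) (db : PySem.Dict Int Int) (h : pvInv da db) :
    pvInv
      (dv_table.foldl (fun d p =>
        p.2.foldl (fun d q => d.modify q.1 [] (fun l => l ++ [(p.1, q.2)])) d) da)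
      (dv_table.foldl (fun dv p =>
        p.2.foldl (fun dv q =>
          match dv.get? q.1 with
          | none => dv.insert q.1 q.2
          | some cur => if q.2 < cur then dv.insert q.1 q.2 else dv) dv) db) := by
  induction dv_table generalizing da db with
  | nil => exact h
  | cons p t ih =>
    simp only [List.foldl_cons]
    exact ih _ _ (pvInv_inner p.1 p.2 da db h)

theorem pvInv_empty : pvInv PySem.Dict.empty PySem.Dict.empty := by
  refine ⟨?_, rfl, by intro p hp; cases hp⟩
  simp [PySem.Dict.keys_empty]

-- ===== VERDICT (by name: the statement is the Claim_ definition above) =====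
theorem get_distance_vector_spec : Claim_equal_get_distance_vector := by
  intro dv_table _
  unfold Spec_get_distance_vector
  unfold get_distance_vector get_distance_vector_alt
  obtain ⟨hnd, hit, _⟩ := pvInv_outer dv_table _ _ pvInv_empty
  set dtn := dv_table.foldl (fun d p =>
    p.2.foldl (fun d q => d.modify q.1 [] (fun l => l ++ [(p.1, q.2)])) d) PySem.Dict.empty
  rw [PySem.Dict.items_foldl_insert_fresh dtn.items (fun p => p.1) (fun p => pvMinCost p.2)
      PySem.Dict.empty (by intro a _; exact PySem.Dict.contains_empty a.1) hnd]
  rw [hit]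
  rfl
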